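-- pv_equiv track=rewrite | github.com/opendatalab/MinerU | mineru/utils/pdf_image_tools.py | _build_render_page_ranges
-- ===== SOURCE A (Python) =====
-- def _build_render_page_ranges(
--     start_page_id: int,
--     end_page_id: int,
--     process_count: int,
-- ) -> list[tuple[int, int]]:
--     total_pages = end_page_id - start_page_id + 1
--     base_pages, remainder = divmod(total_pages, process_count)
--     page_ranges = []
--     current_page = start_page_id
--
--     for process_idx in range(process_count):
--         pages_in_range = base_pages + (1 if process_idx < remainder else 0)
--         range_end = current_page + pages_in_range - 1
--         page_ranges.append((current_page, range_end))
--         current_page = range_end + 1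
--
--     return page_ranges
-- ===== SOURCE B (Python) =====
-- def _build_render_page_ranges(
--     start_page_id: int,
--     end_page_id: int,
--     process_count: int,
-- ) -> list[tuple[int, int]]:
--     base_pages, remainder = divmod(end_page_id - start_page_id + 1, process_count)
--     return [
--         (start_page_id + i * base_pages + min(i, remainder),
--          start_page_id + (i + 1) * base_pages + min(i + 1, remainder) - 1)
--         for i in range(process_count)
--     ]
-- ===== Notes on version B (the rewrite author's own statement) =====
-- stated objective: alternative
-- what changed: Replaces the loop-carried current_page accumulator with a stateless closed-form: each chunk's endpoints are computed directly from the index as start_page_id + i*base + min(i, remainder), so the list is a pure map over range(process_count) with no running state.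
import Mathlib
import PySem

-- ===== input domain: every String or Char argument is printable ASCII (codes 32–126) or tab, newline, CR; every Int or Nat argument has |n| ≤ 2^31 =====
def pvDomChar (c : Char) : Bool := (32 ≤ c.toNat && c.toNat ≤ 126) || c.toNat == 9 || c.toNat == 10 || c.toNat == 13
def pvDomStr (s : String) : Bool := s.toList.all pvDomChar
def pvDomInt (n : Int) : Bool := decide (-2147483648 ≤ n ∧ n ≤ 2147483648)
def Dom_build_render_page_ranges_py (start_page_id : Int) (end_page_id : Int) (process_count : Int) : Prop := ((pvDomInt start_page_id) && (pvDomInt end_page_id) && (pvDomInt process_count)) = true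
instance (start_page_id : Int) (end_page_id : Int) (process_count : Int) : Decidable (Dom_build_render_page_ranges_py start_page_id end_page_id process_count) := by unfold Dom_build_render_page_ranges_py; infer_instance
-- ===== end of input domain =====

-- B replaces A's running current_page accumulator with a stateless closed-form per index (objective: alternative decomposition).

-- ===== PORT A =====
def build_render_page_ranges_py (start_page_id : Int) (end_page_id : Int) (process_count : Int) : List (Int × Int) :=
  let total_pages := end_page_id - start_page_id + 1
  let base_pages := PySem.Int.floordiv total_pages process_count
  let remainder := PySem.Int.mod total_pages process_count
  ((PySem.List.pyRange 0 process_count 1).foldl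
    (fun st process_idx =>
      let pages_in_range := base_pages + (if process_idx < remainder then (1:Int) else 0)
      let range_end := st.2 + pages_in_range - 1
      (st.1 ++ [(st.2, range_end)], range_end + 1))
    ([], start_page_id)).1

-- ===== PORT B =====
def build_render_page_ranges_py_alt (start_page_id : Int) (end_page_id : Int) (process_count : Int) : List (Int × Int) :=
  let base_pages := PySem.Int.floordiv (end_page_id - start_page_id + 1) process_count
  let remainder := PySem.Int.mod (end_page_id - start_page_id + 1) process_count
  (PySem.List.pyRange 0 process_count 1).map
    (fun i => (start_page_id + i * base_pages + min i remainder,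
               start_page_id + (i + 1) * base_pages + min (i + 1) remainder - 1))

-- ===== PRECONDITION & SPEC =====
-- Python's divmod raises ZeroDivisionError when process_count == 0 (in both A and B); that input is excluded.
def Pre_build_render_page_ranges_py (start_page_id : Int) (end_page_id : Int) (process_count : Int) : Prop := process_count ≠ 0
instance (start_page_id : Int) (end_page_id : Int) (process_count : Int) : Decidable (Pre_build_render_page_ranges_py start_page_id end_page_id process_count) := by unfold Pre_build_render_page_ranges_py; infer_instance
def pvWitness_build_render_page_ranges_py : Int × Int × Int := (0, 9, 3)

def Spec_build_render_page_ranges_py (start_page_id : Int) (end_page_id : Int) (process_count : Int) (out : List (Int × Int)) : Prop := out = build_render_page_ranges_py_alt start_page_id end_page_id process_count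
instance (start_page_id : Int) (end_page_id : Int) (process_count : Int) (out : List (Int × Int)) : Decidable (Spec_build_render_page_ranges_py start_page_id end_page_id process_count out) := by unfold Spec_build_render_page_ranges_py; infer_instance

-- ===== CLAIM =====
def Claim_equal_build_render_page_ranges_py : Prop := ∀ (start_page_id : Int) (end_page_id : Int) (process_count : Int), Dom_build_render_page_ranges_py start_page_id end_page_id process_count → Pre_build_render_page_ranges_py start_page_id end_page_id process_count → Spec_build_render_page_ranges_py start_page_id end_page_id process_count (build_render_page_ranges_py start_page_id end_page_id process_count)

-- ===== LEMMAS AND PROOFS =====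

-- Loop invariant: folding A's body over range(0, n) yields B's map together with the
-- closed-form current page  s + n*base + min n rem.
lemma pv_fold_invariant (s base rem : Int) (hrem : 0 ≤ rem) :
    ∀ (n : Int), 0 ≤ n →
      ((PySem.List.pyRange 0 n 1).foldl
        (fun st (process_idx : Int) =>
          let pages_in_range := base + (if process_idx < rem then (1:Int) else 0)
          let range_end := st.2 + pages_in_range - 1
          (st.1 ++ [(st.2, range_end)], range_end + 1))
        (([] : List (Int × Int)), s))
      = ((PySem.List.pyRange 0 n 1).map
          (fun i => (s + i * base + min i rem, s + (i + 1) * base + min (i + 1) rem - 1)),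
         s + n * base + min n rem) := by
  intro n hn
  induction n, hn using Int.le_induction with
  | base =>
      simp [PySem.List.pyRange_one_eq_nil (by omega : (0:Int) ≤ 0)]
      omega
  | succ m hm ih =>
      rw [PySem.List.pyRange_one_succ_right (by omega : (0:Int) ≤ m)]
      rw [List.foldl_append, List.map_append, ih]
      simp only [List.foldl_cons, List.foldl_nil, List.map_cons, List.map_nil]
      have hb : (m + 1) * base = m * base + base := by ring
      have hmin : min (m + 1) rem = min m rem + (if m < rem then (1:Int) else 0) := by
        by_cases h : m < rem <;> simp [h] <;> omega
      have h2 : s + m * base + min m rem + (base + (if m < rem then (1:Int) else 0)) - 1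
          = s + (m + 1) * base + min (m + 1) rem - 1 := by rw [hb, hmin]; ring
      rw [h2, Prod.mk.injEq]
      exact ⟨rfl, by ring⟩

-- ===== VERDICT =====
theorem build_render_page_ranges_py_spec : Claim_equal_build_render_page_ranges_py := by
  intro s e pc _hdom hpre
  unfold Spec_build_render_page_ranges_py build_render_page_ranges_py build_render_page_ranges_py_alt
  dsimp only
  by_cases hpc : 0 < pc
  · have hrem : 0 ≤ PySem.Int.mod (e - s + 1) pc := PySem.Int.mod_nonneg _ hpc
    rw [pv_fold_invariant s _ _ hrem pc (le_of_lt hpc)]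
  · rw [PySem.List.pyRange_one_eq_nil (by omega : pc ≤ 0)]
    simp
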